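-- pv_equiv track=rewrite | github.com/abrahamathul1111-stack/mie1624-project | overall copied/project/src/simulation/state_transition.py | map_countries_to_clusters
-- ===== SOURCE A (Python) =====
-- COUNTRY_CLUSTER_MAP = {
--     "United States of America": "Cluster 2 USA/China",
--     "China": "Cluster 2 USA/China",
--     "South Korea": "Cluster 1 Asia-Pacific / high-intensity",
--     "Singapore": "Cluster 1 Asia-Pacific / high-intensity",
--     "India": "Cluster 1 Asia-Pacific / high-intensity",
--     "Israel": "Cluster 1 Asia-Pacific / high-intensity",
--     "UAE": "Cluster 1 Asia-Pacific / high-intensity",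
--     "Japan": "Cluster 1 Asia-Pacific / high-intensity",
--     "Canada": "Cluster 3 Western policy-led peers",
--     "United Kingdom": "Cluster 3 Western policy-led peers",
--     "Germany": "Cluster 3 Western policy-led peers",
--     "France": "Cluster 3 Western policy-led peers",
--     "Spain": "Cluster 3 Western policy-led peers",
-- }
--
-- class QuarterlyStateTransitionError(ValueError):
--     """Raised when simulation inputs cannot be aligned deterministically."""
--
-- def map_countries_to_clusters(countries: list[str]) -> dict[str, str]:
--     """Map the baseline countries onto the explicit competitor-drift clusters."""
--
--     missing_countries = sorted(set(countries) - set(COUNTRY_CLUSTER_MAP))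
--     if missing_countries:
--         raise QuarterlyStateTransitionError(
--             "No cluster mapping was defined for these countries: "
--             f"{missing_countries}"
--         )
--     return {country: COUNTRY_CLUSTER_MAP[country] for country in countries}
-- ===== SOURCE B (Python) =====
-- COUNTRY_CLUSTER_MAP = {
--     "United States of America": "Cluster 2 USA/China",
--     "China": "Cluster 2 USA/China",
--     "South Korea": "Cluster 1 Asia-Pacific / high-intensity",
--     "Singapore": "Cluster 1 Asia-Pacific / high-intensity",
--     "India": "Cluster 1 Asia-Pacific / high-intensity",
--     "Israel": "Cluster 1 Asia-Pacific / high-intensity",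
--     "UAE": "Cluster 1 Asia-Pacific / high-intensity",
--     "Japan": "Cluster 1 Asia-Pacific / high-intensity",
--     "Canada": "Cluster 3 Western policy-led peers",
--     "United Kingdom": "Cluster 3 Western policy-led peers",
--     "Germany": "Cluster 3 Western policy-led peers",
--     "France": "Cluster 3 Western policy-led peers",
--     "Spain": "Cluster 3 Western policy-led peers",
-- }
--
-- class QuarterlyStateTransitionError(ValueError):
--     """Raised when simulation inputs cannot be aligned deterministically."""
--
-- def map_countries_to_clusters(countries: list[str]) -> dict[str, str]:
--     """Single pass: build the result dict and collect missing names as we go."""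
--     result = {}
--     missing = []
--     for country in countries:
--         cluster = COUNTRY_CLUSTER_MAP.get(country)
--         if cluster is None:
--             missing.append(country)
--         else:
--             result[country] = cluster
--     if missing:
--         raise QuarterlyStateTransitionError(
--             "No cluster mapping was defined for these countries: "
--             f"{sorted(set(missing))}"
--         )
--     return result
-- ===== Notes on version B (the rewrite author's own statement) =====
-- stated objective: simpler
-- what changed: Replaces A's two-pass structure (set-difference validation pass, then a dict comprehension) with a single pass over countries that builds the result dict and collects missing names simultaneously, raising the same error afterwards.
import Mathlib
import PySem

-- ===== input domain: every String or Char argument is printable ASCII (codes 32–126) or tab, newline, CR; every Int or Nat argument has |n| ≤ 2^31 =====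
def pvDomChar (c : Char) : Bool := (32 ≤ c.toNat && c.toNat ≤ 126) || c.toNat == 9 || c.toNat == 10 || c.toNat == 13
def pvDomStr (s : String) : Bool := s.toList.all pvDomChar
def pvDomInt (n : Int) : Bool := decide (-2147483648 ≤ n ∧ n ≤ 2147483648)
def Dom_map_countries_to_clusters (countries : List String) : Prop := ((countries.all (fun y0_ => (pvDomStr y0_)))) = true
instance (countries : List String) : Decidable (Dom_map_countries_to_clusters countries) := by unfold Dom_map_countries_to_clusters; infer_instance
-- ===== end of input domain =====

-- B replaces A's two passes (set-difference validation, then a dict comprehension) with one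
-- pass that builds the result dict and collects the missing names simultaneously (objective: simpler).

-- shared module constant COUNTRY_CLUSTER_MAP
def pvCCMap : PySem.Dict String String := PySem.Dict.ofList [
  ("United States of America", "Cluster 2 USA/China"),
  ("China", "Cluster 2 USA/China"),
  ("South Korea", "Cluster 1 Asia-Pacific / high-intensity"),
  ("Singapore", "Cluster 1 Asia-Pacific / high-intensity"),
  ("India", "Cluster 1 Asia-Pacific / high-intensity"),
  ("Israel", "Cluster 1 Asia-Pacific / high-intensity"),
  ("UAE", "Cluster 1 Asia-Pacific / high-intensity"),
  ("Japan", "Cluster 1 Asia-Pacific / high-intensity"),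
  ("Canada", "Cluster 3 Western policy-led peers"),
  ("United Kingdom", "Cluster 3 Western policy-led peers"),
  ("Germany", "Cluster 3 Western policy-led peers"),
  ("France", "Cluster 3 Western policy-led peers"),
  ("Spain", "Cluster 3 Western policy-led peers")]

-- ===== PORT A =====
-- missing_countries = sorted(set(countries) - set(COUNTRY_CLUSTER_MAP)); if missing: raise (excluded
-- by Pre_, port returns []); else {c: MAP[c] for c in countries}. Under the guard every lookup
-- succeeds, so MAP[c] is ported as getD c "" (never hits the default on the returning branch).
def map_countries_to_clusters (countries : List String) : List (String × String) :=
  let missing := PySem.List.sorted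
    (PySem.Set.diff (PySem.Set.ofList countries) (PySem.Set.ofList pvCCMap.keys)) (fun x => x) false
  if missing ≠ [] then []
  else (countries.foldl (fun d c => d.insert c (pvCCMap.getD c "")) PySem.Dict.empty).items

-- ===== PORT B =====
-- single pass: (result, missing) accumulator; raise (= []) if any missing, else result.items
def map_countries_to_clusters_alt (countries : List String) : List (String × String) :=
  let st := countries.foldl
    (fun (s : PySem.Dict String String × List String) c =>
      match pvCCMap.get? c with
      | none => (s.1, s.2 ++ [c])
      | some v => (s.1.insert c v, s.2))
    (PySem.Dict.empty, [])
  if st.2 ≠ [] then [] else st.1.items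

-- ===== PRECONDITION & SPEC =====
-- A raises QuarterlyStateTransitionError exactly when some country is not a key of COUNTRY_CLUSTER_MAP;
-- Pre_ admits exactly the inputs on which A returns.
def Pre_map_countries_to_clusters (countries : List String) : Prop :=
  countries.all (fun c => pvCCMap.contains c) = true
instance (countries : List String) : Decidable (Pre_map_countries_to_clusters countries) := by
  unfold Pre_map_countries_to_clusters; infer_instance

def pvWitness_map_countries_to_clusters : List String := ["China", "India", "China"]

def Spec_map_countries_to_clusters (countries : List String) (out : List (String × String)) : Prop := out = map_countries_to_clusters_alt countries
instance (countries : List String) (out : List (String × String)) : Decidable (Spec_map_countries_to_clusters countries out) := by unfold Spec_map_countries_to_clusters; infer_instance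

-- ===== CLAIM (what is proved, stated in full; the proofs are below) =====
def Claim_equal_map_countries_to_clusters : Prop := ∀ (countries : List String), Dom_map_countries_to_clusters countries → Pre_map_countries_to_clusters countries → Spec_map_countries_to_clusters countries (map_countries_to_clusters countries)

-- ===== LEMMAS AND PROOFS =====

-- Under Pre_, A's set difference is empty.
theorem pv_diff_empty (countries : List String)
    (h : ∀ c ∈ countries, pvCCMap.contains c = true) :
    PySem.Set.diff (PySem.Set.ofList countries) (PySem.Set.ofList pvCCMap.keys) = [] := by
  apply List.eq_nil_iff_forall_not_mem.2
  intro x hx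
  have hx' := (PySem.Set.mem_diff _ _ _).1 hx
  have hmem : x ∈ countries := (PySem.Set.mem_ofList _ _).1 hx'.1
  have := h x hmem
  rw [PySem.Dict.contains_iff_mem_keys] at this
  exact hx'.2 ((PySem.Set.mem_ofList _ _).2 this)

-- B's fold, when every country has a mapping, never extends missing and agrees with A's fold.
theorem pv_fold_agree (countries : List String)
    (h : ∀ c ∈ countries, pvCCMap.contains c = true)
    (d : PySem.Dict String String) :
    countries.foldl
      (fun (s : PySem.Dict String String × List String) c =>
        match pvCCMap.get? c with
        | none => (s.1, s.2 ++ [c])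
        | some v => (s.1.insert c v, s.2)) (d, [])
    = (countries.foldl (fun d c => d.insert c (pvCCMap.getD c "")) d, []) := by
  induction countries generalizing d with
  | nil => rfl
  | cons c cs ih =>
    have hc := h c (List.mem_cons_self ..)
    rw [PySem.Dict.contains_eq_isSome_get?] at hc
    obtain ⟨v, hv⟩ := Option.isSome_iff_exists.1 hc
    simp only [List.foldl_cons, hv]
    rw [show pvCCMap.getD c "" = v from PySem.Dict.getD_of_get?_eq_some pvCCMap "" hv]
    exact ih (fun x hx => h x (List.mem_cons_of_mem _ hx)) _

-- ===== VERDICT (by name: the statement is the Claim_ definition above) =====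
theorem map_countries_to_clusters_spec : Claim_equal_map_countries_to_clusters := by
  intro countries _ hpre
  unfold Spec_map_countries_to_clusters map_countries_to_clusters map_countries_to_clusters_alt
  have h : ∀ c ∈ countries, pvCCMap.contains c = true := by
    intro c hc
    exact List.all_eq_true.1 hpre c hc
  rw [pv_diff_empty countries h, pv_fold_agree countries h]
  simp [PySem.List.sorted]
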